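-- pv_equiv track=rewrite | github.com/yserjjj-2022/curious-bot | services/text_utils.py | cleanup_extracted_text
-- ===== SOURCE A (Python) =====
-- def cleanup_extracted_text(text: str) -> str:
--     """
--     Легкая очистка для текста, полученного из PDF/HTML.
--     Главная задача - отрезать "хвост".
--     """
--     if not text:
--         return ""
--
--     lines = text.splitlines()
--     cut_off_index = -1
--
--     stop_words_lower = [
--         'references', 'bibliography', 'data availability statement', 'ethics statement',
--         'author contributions', 'funding', 'conflict of interest', 'supplementary material',
--         'publisher’s note', 'acknowledgement', 'acknowledgements', 'literaturverzeichnis',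
--         'bibliographie', 'referencias', 'bibliografia', 'daftar pustaka', 'список литературы',
--         'список источников', 'источники', 'literature cited', 'works cited'
--     ]
--
--     for i, line in enumerate(lines):
--         if line.strip().lower() in stop_words_lower:
--             cut_off_index = i
--             break
--
--     if cut_off_index != -1:
--         lines = lines[:cut_off_index]
--
--     clean_text = "\n".join(lines)
--
--     lines = (line.strip() for line in clean_text.splitlines())
--     return "\n".join(line for line in lines if line)
-- ===== SOURCE B (Python) =====
-- _STOP_WORDS = frozenset([
--     'references', 'bibliography', 'data availability statement', 'ethics statement',
--     'author contributions', 'funding', 'conflict of interest', 'supplementary material',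
--     'publisher’s note', 'acknowledgement', 'acknowledgements', 'literaturverzeichnis',
--     'bibliographie', 'referencias', 'bibliografia', 'daftar pustaka', 'список литературы',
--     'список источников', 'источники', 'literature cited', 'works cited'
-- ])
--
--
-- def cleanup_extracted_text(text: str) -> str:
--     out = []
--     for line in text.splitlines():
--         s = line.strip()
--         if s.lower() in _STOP_WORDS:
--             break
--         if s:
--             out.append(s)
--     return "\n".join(out)
-- ===== Notes on version B (the rewrite author's own statement) =====
-- stated objective: simpler
-- what changed: A finds a cut index with an enumerate loop, slices, joins the kept lines and re-splits the joined text to strip and filter them in a second pass; B is a single pass over text.splitlines() with an early break at the first stop-word line, appending each stripped non-empty line to the output as it goes, with no sentinel index, no slice and no join-then-resplit round trip.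
import Mathlib
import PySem

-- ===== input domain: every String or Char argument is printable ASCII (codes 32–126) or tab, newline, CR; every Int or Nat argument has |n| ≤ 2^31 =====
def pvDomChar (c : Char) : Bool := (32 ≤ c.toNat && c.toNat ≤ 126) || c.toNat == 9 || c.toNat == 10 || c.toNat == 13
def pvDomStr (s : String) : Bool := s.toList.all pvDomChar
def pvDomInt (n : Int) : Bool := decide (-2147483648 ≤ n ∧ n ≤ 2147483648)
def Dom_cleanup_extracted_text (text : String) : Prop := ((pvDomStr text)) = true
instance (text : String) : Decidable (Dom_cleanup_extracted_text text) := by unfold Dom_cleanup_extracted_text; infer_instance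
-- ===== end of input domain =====

-- B replaces A's find-index / slice / join-then-resplit pipeline by a single pass over the
-- lines with an early break at the first stop word (objective: simpler, same O(n) cost).

-- ===== PORT A =====
def pvStopWords : List String :=
  ["references", "bibliography", "data availability statement", "ethics statement",
   "author contributions", "funding", "conflict of interest", "supplementary material",
   "publisher’s note", "acknowledgement", "acknowledgements", "literaturverzeichnis",
   "bibliographie", "referencias", "bibliografia", "daftar pustaka", "список литературы",
   "список источников", "источники", "literature cited", "works cited"]

-- the `for i, line in enumerate(lines): if …: cut_off_index = i; break` loop
def pvFindCut : List String → Int → Int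
  | [], _ => -1
  | line :: rest, i =>
    if pvStopWords.contains (PySem.Str.lower (PySem.Str.strip line)) then i
    else pvFindCut rest (i + 1)

def cleanup_extracted_text (text : String) : String :=
  if text = "" then ""
  else
    let lines := PySem.Str.splitlines text
    let cut_off_index := pvFindCut lines 0
    let lines := if cut_off_index ≠ -1 then PySem.List.slice lines none (some cut_off_index) else lines
    let clean_text := PySem.Str.join "\n" lines
    let lines2 := (PySem.Str.splitlines clean_text).map PySem.Str.strip
    PySem.Str.join "\n" (lines2.filter (fun line => line ≠ ""))

-- ===== PORT B =====
def pvStopSet : PySem.Set String := PySem.Set.ofList pvStopWords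

-- the single `for line in text.splitlines(): … break / append` loop of Source B
def pvCollect : List String → List String
  | [] => []
  | line :: rest =>
    let s := PySem.Str.strip line
    if PySem.Str.lower s ∈ pvStopSet then []
    else if s ≠ "" then s :: pvCollect rest
    else pvCollect rest

def cleanup_extracted_text_alt (text : String) : String :=
  PySem.Str.join "\n" (pvCollect (PySem.Str.splitlines text))

-- ===== PRECONDITION & SPEC =====
def Spec_cleanup_extracted_text (text : String) (out : String) : Prop := out = cleanup_extracted_text_alt text
instance (text : String) (out : String) : Decidable (Spec_cleanup_extracted_text text out) := by unfold Spec_cleanup_extracted_text; infer_instance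

-- ===== CLAIM (what is proved, stated in full; the proofs are below) =====
def Claim_equal_cleanup_extracted_text : Prop := ∀ (text : String), Dom_cleanup_extracted_text text → Spec_cleanup_extracted_text text (cleanup_extracted_text text)

-- ===== LEMMAS AND PROOFS =====

def pvIsB (c : Char) : Bool :=
  decide (c.toNat = 10) || decide (c.toNat = 13) || decide (c.toNat = 11) || decide (c.toNat = 12) ||
  decide (c.toNat = 28) || decide (c.toNat = 29) || decide (c.toNat = 30) || decide (c.toNat = 133) ||
  decide (c.toNat = 8232) || decide (c.toNat = 8233)

theorem pv_go_newline (rest cur : List Char) (acc : List (List Char)) :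
    PySem.Chars.splitlines.go pvIsB ('\n' :: rest) cur acc =
      PySem.Chars.splitlines.go pvIsB rest [] (cur.reverse :: acc) := by
  rw [PySem.Chars.splitlines.go]
  split
  · simp_all
  · exact absurd (by decide : pvIsB '\n' = true) (by assumption)
  · exact fun _ h _ => absurd h (by decide)

theorem pv_go_cons (c : Char) (hc : pvIsB c = false) (rest cur : List Char) (acc : List (List Char)) :
    PySem.Chars.splitlines.go pvIsB (c :: rest) cur acc =
      PySem.Chars.splitlines.go pvIsB rest (c :: cur) acc := by
  rw [PySem.Chars.splitlines.go]
  split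
  · simp_all
  · rfl
  · intro _ h _; rw [h] at hc; exact absurd hc (by decide)


theorem pv_go_nil (cur : List Char) (acc : List (List Char)) :
    PySem.Chars.splitlines.go pvIsB [] cur acc =
      if cur.isEmpty then acc.reverse else (cur.reverse :: acc).reverse := by
  rw [PySem.Chars.splitlines.go]

theorem pv_go_seg (l : List Char) (hl : ∀ c ∈ l, pvIsB c = false) :
    ∀ (rest cur : List Char) (acc : List (List Char)),
    PySem.Chars.splitlines.go pvIsB (l ++ rest) cur acc =
      PySem.Chars.splitlines.go pvIsB rest (l.reverse ++ cur) acc := by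
  induction l with
  | nil => simp
  | cons c l ih =>
    intro rest cur acc
    rw [List.cons_append, pv_go_cons c (hl c (by simp)) _ _ _,
        ih (fun d hd => hl d (by simp [hd]))]
    simp

def pvTrim : List (List Char) → List (List Char)
  | [] => []
  | [x] => if x = [] then [] else [x]
  | x :: y :: xs => x :: pvTrim (y :: xs)

theorem pv_go_join (T : List (List Char)) (hT : ∀ l ∈ T, ∀ c ∈ l, pvIsB c = false) :
    ∀ acc, PySem.Chars.splitlines.go pvIsB (PySem.Chars.join ['\n'] T) [] acc =
      acc.reverse ++ pvTrim T := by
  induction T with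
  | nil => intro acc; simp [PySem.Chars.join_nil, pv_go_nil, pvTrim]
  | cons x T ih =>
    intro acc
    match T with
    | [] =>
      rw [PySem.Chars.join_singleton]
      rw [show x = x ++ [] from by simp, pv_go_seg x (hT x (by simp)) [] [] acc]
      rw [pv_go_nil]
      simp [pvTrim, List.isEmpty_iff]
      split <;> simp_all
    | y :: T' =>
      rw [PySem.Chars.join_cons_cons]
      rw [List.append_assoc, pv_go_seg x (hT x (by simp)) _ [] acc]
      rw [show ['\n'] ++ PySem.Chars.join ['\n'] (y :: T') = '\n' :: PySem.Chars.join ['\n'] (y :: T') from rfl]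
      rw [pv_go_newline]
      simp only [List.append_nil, List.reverse_reverse]
      rw [ih (fun l hl => hT l (by simp [hl])) (x :: acc)]
      simp [pvTrim]

theorem pv_splitlines_join (T : List (List Char)) (hT : ∀ l ∈ T, ∀ c ∈ l, pvIsB c = false) :
    PySem.Chars.splitlines (PySem.Chars.join ['\n'] T) = pvTrim T := by
  rw [show PySem.Chars.splitlines (PySem.Chars.join ['\n'] T) = PySem.Chars.splitlines.go pvIsB (PySem.Chars.join ['\n'] T) [] [] from rfl]
  rw [pv_go_join T hT]; rfl

theorem pv_go_crlf (rest cur : List Char) (acc : List (List Char)) :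
    PySem.Chars.splitlines.go pvIsB ('\x0d' :: '\n' :: rest) cur acc =
      PySem.Chars.splitlines.go pvIsB rest [] (cur.reverse :: acc) := by
  rw [PySem.Chars.splitlines.go]

theorem pv_go_break (c : Char) (rest cur : List Char) (acc : List (List Char))
    (hne : ∀ r, c = '\x0d' → rest = '\n' :: r → False) (hB : pvIsB c = true) :
    PySem.Chars.splitlines.go pvIsB (c :: rest) cur acc =
      PySem.Chars.splitlines.go pvIsB rest [] (cur.reverse :: acc) := by
  rw [PySem.Chars.splitlines.go]
  split
  · simp_all
  · simp
  · exact hne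

theorem pv_go_nf : ∀ (s cur : List Char) (acc : List (List Char)),
    (∀ c ∈ cur, pvIsB c = false) → (∀ l ∈ acc, ∀ c ∈ l, pvIsB c = false) →
    ∀ l ∈ PySem.Chars.splitlines.go pvIsB s cur acc, ∀ c ∈ l, pvIsB c = false := by
  intro s cur acc
  induction s, cur, acc using PySem.Chars.splitlines.go.induct pvIsB with
  | case1 cur acc h =>
    intro hcur hacc l hl
    rw [pv_go_nil, if_pos h] at hl
    exact hacc l (by simpa using hl)
  | case2 cur acc h =>
    intro hcur hacc l hl
    rw [pv_go_nil, if_neg h] at hl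
    simp at hl
    rcases hl with hl | rfl
    · exact hacc l hl
    · intro c hc; exact hcur c (by simpa using hc)
  | case3 rest cur acc ih =>
    intro hcur hacc
    rw [pv_go_crlf]
    have hacc2 : ∀ l ∈ cur.reverse :: acc, ∀ c ∈ l, pvIsB c = false := by
      intro l hl
      rcases List.mem_cons.mp hl with rfl | hl
      · intro d hd; exact hcur d (by simpa using hd)
      · exact hacc l hl
    exact ih (by simp) hacc2
  | case4 c rest cur acc hne hB ih =>
    intro hcur hacc
    rw [pv_go_break c rest cur acc hne (by simpa using hB)]
    have hacc2 : ∀ l ∈ cur.reverse :: acc, ∀ c ∈ l, pvIsB c = false := by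
      intro l hl
      rcases List.mem_cons.mp hl with rfl | hl
      · intro d hd; exact hcur d (by simpa using hd)
      · exact hacc l hl
    exact ih (by simp) hacc2
  | case5 c rest cur acc hne hB ih =>
    intro hcur hacc
    rw [pv_go_cons c (by simpa using hB)]
    have hcur2 : ∀ d ∈ c :: cur, pvIsB d = false := by
      intro d hd
      rcases List.mem_cons.mp hd with rfl | hd
      · simpa using hB
      · exact hcur d hd
    exact ih hcur2 hacc

def pvTrimS : List String → List String
  | [] => []
  | [x] => if x = "" then [] else [x]
  | x :: y :: xs => x :: pvTrimS (y :: xs)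

theorem pv_trim_map : ∀ T : List String, pvTrim (T.map String.toList) = (pvTrimS T).map String.toList
  | [] => rfl
  | [x] => by
    simp only [List.map_cons, List.map_nil, pvTrim, pvTrimS, String.toList_eq_nil_iff]
    split <;> simp_all
  | x :: y :: T => by
    simp only [List.map_cons, pvTrim, pvTrimS]
    rw [show (String.toList y :: List.map String.toList T) = List.map String.toList (y :: T) from rfl,
        pv_trim_map (y :: T)]

theorem pv_splitlines_join_str (T : List String) (hT : ∀ l ∈ T, ∀ c ∈ l.toList, pvIsB c = false) :
    PySem.Str.splitlines (PySem.Str.join "\n" T) = pvTrimS T := by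
  have hinj : Function.Injective (List.map String.toList) :=
    List.map_injective_iff.mpr (fun a b h => String.toList_inj.mp h)
  apply hinj
  rw [PySem.Str.splitlines_map_toList, PySem.Str.toList_join, ← pv_trim_map]
  rw [show ("\n" : String).toList = ['\n'] from by decide]
  exact pv_splitlines_join _ (by intro l hl; simp at hl; obtain ⟨a, ha, rfl⟩ := hl; exact hT a ha)

theorem pv_filter_trim : ∀ T : List String,
    ((pvTrimS T).map PySem.Str.strip).filter (fun l => decide (l ≠ "")) =
      (T.map PySem.Str.strip).filter (fun l => decide (l ≠ ""))
  | [] => rfl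
  | [x] => by
    by_cases hx : x = ""
    · subst hx; simp [pvTrimS]; decide
    · simp [pvTrimS, hx]
  | x :: y :: T => by
    have ih := pv_filter_trim (y :: T)
    simp only [pvTrimS, List.map_cons, List.filter_cons] at ih ⊢
    rw [ih]

def pvNoStop (l : String) : Bool := !(pvStopWords.contains (PySem.Str.lower (PySem.Str.strip l)))

theorem pv_findcut_neg (L : List String) : ∀ (i : Int), 0 ≤ i → pvFindCut L i = -1 →
    L.takeWhile pvNoStop = L := by
  induction L with
  | nil => intro i _ _; rfl
  | cons l L ih =>
    intro i hi h
    by_cases hs : PySem.Str.lower (PySem.Str.strip l) ∈ pvStopWords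
    · simp only [pvFindCut, List.contains_iff_mem, hs, if_true] at h; omega
    · simp only [pvFindCut, List.contains_iff_mem, hs, decide_false, Bool.false_eq_true, if_false] at h
      simp [List.takeWhile_cons, pvNoStop, List.contains_iff_mem, hs, ih (i+1) (by omega) h]

theorem pv_findcut_pos (L : List String) : ∀ (i : Int), 0 ≤ i → pvFindCut L i ≠ -1 →
    i ≤ pvFindCut L i ∧
      PySem.List.slice L none (some (pvFindCut L i - i)) = L.takeWhile pvNoStop := by
  induction L with
  | nil => intro i _ h; simp [pvFindCut] at h
  | cons l L ih =>
    intro i hi h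
    by_cases hs : PySem.Str.lower (PySem.Str.strip l) ∈ pvStopWords
    · simp only [pvFindCut, List.contains_iff_mem, hs, decide_true, if_true] at h ⊢
      refine ⟨le_refl i, ?_⟩
      rw [show i - i = (0:Int) from by omega, PySem.List.slice_to _ (by omega)]
      simp [List.takeWhile_cons, pvNoStop, hs]
    · simp only [pvFindCut, List.contains_iff_mem, hs, decide_false, Bool.false_eq_true, if_false] at h ⊢
      obtain ⟨h1, h2⟩ := ih (i+1) (by omega) h
      refine ⟨by omega, ?_⟩
      rw [PySem.List.slice_to _ (by omega)] at h2 ⊢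
      have hsucc : (pvFindCut L (i+1) - i).toNat = (pvFindCut L (i+1) - (i+1)).toNat + 1 := by omega
      rw [hsucc]
      simp [List.take_succ_cons, h2, List.takeWhile_cons, pvNoStop, List.contains_iff_mem, hs]

theorem pv_collect_eq : ∀ L : List String,
    pvCollect L = ((L.takeWhile pvNoStop).map PySem.Str.strip).filter (fun l => decide (l ≠ ""))
  | [] => rfl
  | l :: L => by
    by_cases hs : PySem.Str.lower (PySem.Str.strip l) ∈ pvStopWords
    · have hmem : PySem.Str.lower (PySem.Str.strip l) ∈ pvStopSet := by
        rw [pvStopSet, PySem.Set.mem_ofList]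
        exact hs
      have h1 : pvCollect (l :: L) = [] := by simp [pvCollect, hmem]
      have h2 : List.takeWhile pvNoStop (l :: L) = [] := by
        simp [List.takeWhile_cons, pvNoStop, hs]
      rw [h1, h2]
      rfl
    · have hmem : ¬ (PySem.Str.lower (PySem.Str.strip l) ∈ pvStopSet) := by
        rw [pvStopSet, PySem.Set.mem_ofList]
        exact hs
      have h2 : List.takeWhile pvNoStop (l :: L) = l :: List.takeWhile pvNoStop L := by
        simp [List.takeWhile_cons, pvNoStop, hs]
      have hL := pv_collect_eq L
      rw [h2]
      by_cases he : PySem.Str.strip l = ""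
      · rw [he] at hmem
        simp [pvCollect, hmem, he, hL]
      · simp [pvCollect, hmem, he, hL]

theorem pv_main (text : String) : cleanup_extracted_text text = cleanup_extracted_text_alt text := by
  by_cases ht : text = ""
  · subst ht; decide
  · unfold cleanup_extracted_text cleanup_extracted_text_alt
    rw [if_neg ht]
    set L := PySem.Str.splitlines text with hL
    have hcut : (if pvFindCut L 0 ≠ -1 then PySem.List.slice L none (some (pvFindCut L 0)) else L)
        = L.takeWhile pvNoStop := by
      by_cases hf : pvFindCut L 0 = -1
      · rw [if_neg (by simp [hf]), pv_findcut_neg L 0 (by norm_num) hf]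
      · obtain ⟨h1, h2⟩ := pv_findcut_pos L 0 (by norm_num) hf
        rw [if_pos hf]
        simpa using h2
    have hNF : ∀ l ∈ L, ∀ c ∈ l.toList, pvIsB c = false := by
      intro l hl
      have hmem : l.toList ∈ PySem.Chars.splitlines text.toList := by
        rw [← PySem.Str.splitlines_map_toList]
        exact List.mem_map_of_mem hl
      exact pv_go_nf text.toList [] [] (by simp) (by simp) l.toList hmem
    have hNF' : ∀ l ∈ L.takeWhile pvNoStop, ∀ c ∈ l.toList, pvIsB c = false :=
      fun l hl => hNF l ((List.takeWhile_sublist pvNoStop).subset hl)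
    simp only [hcut]
    rw [pv_splitlines_join_str _ hNF']
    rw [pv_filter_trim]
    rw [pv_collect_eq]

-- ===== VERDICT (by name: the statement is the Claim_ definition above) =====
theorem cleanup_extracted_text_spec : Claim_equal_cleanup_extracted_text := by
  intro text _
  unfold Spec_cleanup_extracted_text
  exact pv_main text
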